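-- pv_equiv track=rewrite | github.com/EdwinOrtegaK/Deteccion-Correccion_1 | receiver_py/enlace_hamming.py | _pretty_bits_msb
-- ===== SOURCE A (Python) =====
-- def _pretty_bits_msb(bits_msb: str) -> str:
--     """
--     Inserta espacios cada 4 bits para legibilidad visual (MSB->LSB).
--     """
--     chunks = []
--     s = bits_msb
--     while s:
--         take = len(s) % 4 or 4
--         chunks.append(s[:take])
--         s = s[take:]
--     return " ".join(chunks)
-- ===== SOURCE B (Python) =====
-- def _pretty_bits_msb(bits_msb: str) -> str:
--     """
--     Inserta espacios cada 4 bits para legibilidad visual (MSB->LSB).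
--     """
--     n = len(bits_msb)
--     out = []
--     for i, c in enumerate(bits_msb):
--         if i > 0 and (n - i) % 4 == 0:
--             out.append(' ')
--         out.append(c)
--     return ''.join(out)
-- ===== Notes on version B (the rewrite author's own statement) =====
-- stated objective: alternative
-- what changed: Replaces the while-loop that repeatedly slices off a remainder-first chunk and joins the chunk list with a single enumerate pass that emits each character and inserts a space exactly when the right-anchored position (n - i) is a positive multiple-of-4 boundary.
import Mathlib
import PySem

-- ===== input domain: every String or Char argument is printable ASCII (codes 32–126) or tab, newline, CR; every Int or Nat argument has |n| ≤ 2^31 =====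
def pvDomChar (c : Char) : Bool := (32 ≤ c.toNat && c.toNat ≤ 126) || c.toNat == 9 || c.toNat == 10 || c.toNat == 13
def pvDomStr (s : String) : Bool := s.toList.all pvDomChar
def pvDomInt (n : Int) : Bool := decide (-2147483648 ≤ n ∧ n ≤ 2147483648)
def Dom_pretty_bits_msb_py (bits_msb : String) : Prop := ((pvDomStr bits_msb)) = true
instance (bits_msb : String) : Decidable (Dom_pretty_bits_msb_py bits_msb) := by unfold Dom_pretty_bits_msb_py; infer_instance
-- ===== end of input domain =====

-- B replaces A's chunk-slicing while-loop + " ".join with a single enumerate pass that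
-- inserts a space whenever the right-anchored position (n - i) hits a multiple-of-4 boundary
-- (objective: alternative decomposition, same O(n) cost).


-- ===== PORT A =====
-- the while-loop: slice off a chunk of size (len % 4 or 4), recurse on the rest
def pvAChunks (s : List Char) : List (List Char) :=
  if h : s = [] then []
  else
    let t : Nat := if s.length % 4 = 0 then 4 else s.length % 4
    PySem.List.slice s none (some (t : Int)) :: pvAChunks (PySem.List.slice s (some (t : Int)) none)
termination_by s.length
decreasing_by
  simp only [PySem.List.slice_from_natCast, List.length_drop]
  have hl : s.length ≠ 0 := by simpa using h
  split <;> omega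

def pretty_bits_msb_py (bits_msb : String) : String :=
  String.mk (PySem.Chars.join [' '] (pvAChunks bits_msb.toList))

-- ===== PORT B =====
-- loop body: 'if i > 0 and (n - i) % 4 == 0: out.append(" "); out.append(c)'
def pvBStep (n : Int) (acc : List Char) (ic : Int × Char) : List Char :=
  let acc' := if 0 < ic.1 ∧ PySem.Int.mod (n - ic.1) 4 = 0 then acc ++ [' '] else acc
  acc' ++ [ic.2]

def pretty_bits_msb_py_alt (bits_msb : String) : String :=
  let cs := bits_msb.toList
  let n : Int := (cs.length : Int)
  String.mk ((PySem.List.enumerate cs).foldl (pvBStep n) [])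

-- ===== PRECONDITION & SPEC =====
def Spec_pretty_bits_msb_py (bits_msb : String) (out : String) : Prop := out = pretty_bits_msb_py_alt bits_msb
instance (bits_msb : String) (out : String) : Decidable (Spec_pretty_bits_msb_py bits_msb out) := by unfold Spec_pretty_bits_msb_py; infer_instance

-- ===== CLAIM (what is proved, stated in full; the proofs are below) =====
def Claim_equal_pretty_bits_msb_py : Prop := ∀ (bits_msb : String), Dom_pretty_bits_msb_py bits_msb → Spec_pretty_bits_msb_py bits_msb (pretty_bits_msb_py bits_msb)

-- ===== LEMMAS AND PROOFS =====

-- B's per-character emitted segment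
def pvG (n : Int) (p : Int × Char) : List Char :=
  (if 0 < p.1 ∧ PySem.Int.mod (n - p.1) 4 = 0 then [' '] else []) ++ [p.2]

theorem pvBStep_eq (n : Int) (acc : List Char) (ic : Int × Char) :
    pvBStep n acc ic = acc ++ pvG n ic := by
  unfold pvBStep pvG
  split <;> simp

theorem pvB_foldl (n : Int) (l : List (Int × Char)) (acc : List Char) :
    l.foldl (pvBStep n) acc = acc ++ l.flatMap (pvG n) := by
  have : pvBStep n = fun acc ic => acc ++ pvG n ic := by
    funext acc ic; exact pvBStep_eq n acc ic
  rw [this]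
  exact PySem.List.foldl_append_eq_flatMap ..

theorem pvMod4 (a : Int) : PySem.Int.mod a 4 = a % 4 :=
  PySem.Int.mod_eq_emod_of_pos (by norm_num)

-- inside a chunk no separator fires: the flatMap is the identity
theorem pvHelper1 (xs : List Char) :
    ∀ (s n : Int), (∀ k : Nat, k < xs.length → ¬(0 < s + (k : Int) ∧ (n - (s + (k : Int))) % 4 = 0)) →
      (PySem.List.enumerate xs s).flatMap (pvG n) = xs := by
  induction xs with
  | nil => intro s n _; simp [PySem.List.enumerate_nil]
  | cons x xs ih =>
    intro s n h
    rw [PySem.List.enumerate_cons, List.flatMap_cons]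
    have h0 : ¬(0 < s ∧ (n - s) % 4 = 0) := by
      have h' := h 0 (by simp)
      simp only [Nat.cast_zero, add_zero] at h'
      exact h'
    have hx : pvG n (s, x) = [x] := by
      unfold pvG
      rw [pvMod4, if_neg h0]
      simp
    have htail : (PySem.List.enumerate xs (s + 1)).flatMap (pvG n) = xs := by
      apply ih
      intro k hk hand
      apply h (k + 1) (by simpa using Nat.succ_lt_succ hk)
      push_cast
      exact ⟨by omega, by rw [show n - (s + ((k : Int) + 1)) = n - (s + 1 + (k : Int)) by ring]; exact hand.2⟩
    rw [hx, htail]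
    rfl

-- shifting start and length together leaves the output unchanged (once every index is positive)
theorem pvHelper2 (xs : List Char) :
    ∀ (s₁ s₂ n₁ n₂ : Int), 1 ≤ s₁ → 1 ≤ s₂ → n₁ - s₁ = n₂ - s₂ →
      (PySem.List.enumerate xs s₁).flatMap (pvG n₁) = (PySem.List.enumerate xs s₂).flatMap (pvG n₂) := by
  induction xs with
  | nil => intro _ _ _ _ _ _ _; simp [PySem.List.enumerate_nil]
  | cons x xs ih =>
    intro s₁ s₂ n₁ n₂ h1 h2 hd
    rw [PySem.List.enumerate_cons, PySem.List.enumerate_cons, List.flatMap_cons, List.flatMap_cons]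
    have hx : pvG n₁ (s₁, x) = pvG n₂ (s₂, x) := by
      unfold pvG
      simp only [show n₁ - s₁ = n₂ - s₂ from hd]
      by_cases hc : PySem.Int.mod (n₂ - s₂) 4 = 0 <;>
        simp [show (0:Int) < s₁ by omega, show (0:Int) < s₂ by omega]
    rw [hx, ih (s₁ + 1) (s₂ + 1) n₁ n₂ (by omega) (by omega) (by omega)]

-- the main equivalence on char lists
theorem pvMain (N : Nat) : ∀ cs : List Char, cs.length ≤ N →
    PySem.Chars.join [' '] (pvAChunks cs) = (PySem.List.enumerate cs).flatMap (pvG (cs.length : Int)) := by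
  induction N with
  | zero =>
    intro cs hcs
    have : cs = [] := List.length_eq_zero_iff.mp (Nat.le_zero.mp hcs)
    subst this
    rw [pvAChunks]
    simp [PySem.List.enumerate_nil, PySem.Chars.join_nil]
  | succ N ih =>
    intro cs hcs
    by_cases hnil : cs = []
    · subst hnil
      rw [pvAChunks]
      simp [PySem.List.enumerate_nil, PySem.Chars.join_nil]
    · obtain ⟨t, ht⟩ : ∃ t : Nat, t = if cs.length % 4 = 0 then 4 else cs.length % 4 := ⟨_, rfl⟩
      have hnpos : 0 < cs.length := List.length_pos_iff.mpr hnil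
      have htc : (cs.length % 4 = 0 ∧ t = 4) ∨ (cs.length % 4 ≠ 0 ∧ t = cs.length % 4) := by
        rw [ht]; split <;> simp_all
      have ht1 : 1 ≤ t := by omega
      have htn : t ≤ cs.length := by omega
      have htmod : (cs.length - t) % 4 = 0 := by omega
      have hA : pvAChunks cs = cs.take t :: pvAChunks (cs.drop t) := by
        rw [pvAChunks]
        simp only [dif_neg hnil, ← ht, PySem.List.slice_to_natCast, PySem.List.slice_from_natCast]
      have hlen_take : (cs.take t).length = t := by
        rw [List.length_take]; omega
      have hchunk : (PySem.List.enumerate (cs.take t) 0).flatMap (pvG (cs.length : Int)) = cs.take t := by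
        apply pvHelper1
        intro k hk hand
        rw [hlen_take] at hk
        obtain ⟨h1, h2⟩ := hand
        have hk1 : 1 ≤ k := by
          by_contra hc
          have : k = 0 := by omega
          subst this
          simp at h1
        have hnk : ((cs.length - k : Nat) : Int) % 4 = 0 := by
          rw [Nat.cast_sub (by omega : k ≤ cs.length)]
          rw [show ((cs.length : Int) - (k : Int)) = ((cs.length : Int) - (0 + (k : Int))) by ring]
          exact h2
        have hmodnat : (cs.length - k) % 4 = 0 := by
          have := (Int.natCast_mod (cs.length - k) 4).symm.trans hnk
          exact_mod_cast this
        omega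
      rw [hA]
      have hsplit : PySem.List.enumerate cs 0 =
          PySem.List.enumerate (cs.take t) 0 ++ PySem.List.enumerate (cs.drop t) ((t : Int)) := by
        conv_lhs => rw [← List.take_append_drop t cs]
        rw [PySem.List.enumerate_append, hlen_take, zero_add]
      rw [show PySem.List.enumerate cs = PySem.List.enumerate cs 0 from rfl, hsplit, List.flatMap_append]
      by_cases hys : cs.drop t = []
      · have hnilchunks : pvAChunks (cs.drop t) = [] := by
          rw [hys, pvAChunks]; simp
        rw [hnilchunks, PySem.Chars.join_singleton, hys]
        simp [PySem.List.enumerate_nil, hchunk]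
      · obtain ⟨y, ys, hys'⟩ := List.exists_cons_of_ne_nil hys
        have hlys : (cs.drop t).length = cs.length - t := List.length_drop ..
        have hIH : PySem.Chars.join [' '] (pvAChunks (cs.drop t)) =
            (PySem.List.enumerate (cs.drop t)).flatMap (pvG ((cs.length - t : Nat) : Int)) := by
          rw [← hlys]
          exact ih (cs.drop t) (by omega)
        obtain ⟨r1, rl, hr⟩ : ∃ r1 rl, pvAChunks (cs.drop t) = r1 :: rl := by
          rw [pvAChunks]
          simp only [dif_neg hys]
          exact ⟨_, _, rfl⟩
        rw [hr, PySem.Chars.join_cons_cons, ← hr, hIH]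
        rw [hys', PySem.List.enumerate_cons, PySem.List.enumerate_cons, List.flatMap_cons, List.flatMap_cons]
        have hcast : ((cs.length : Int) - (t : Int)) = ((cs.length - t : Nat) : Int) := by
          rw [Nat.cast_sub htn]
        have hcond : 0 < ((t : Int), y).1 ∧ (((cs.length : Int)) - ((t : Int), y).1) % 4 = 0 := by
          refine ⟨by show (0:Int) < (t:Int); exact_mod_cast ht1, ?_⟩
          show ((cs.length : Int) - (t : Int)) % 4 = 0
          rw [hcast, show ((cs.length - t : Nat) : Int) % 4 = (((cs.length - t) % 4 : Nat) : Int) from (Int.natCast_mod _ _).symm]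
          exact_mod_cast htmod
        have hhead1 : pvG (cs.length : Int) ((t : Int), y) = [' ', y] := by
          unfold pvG
          rw [pvMod4, if_pos hcond]
          rfl
        have hhead2 : pvG (((cs.length - t : Nat)) : Int) (0, y) = [y] := by
          unfold pvG
          rw [if_neg]
          · simp
          · rintro ⟨h1, -⟩; exact lt_irrefl _ h1
        rw [hhead1, hhead2]
        have htail : (PySem.List.enumerate ys ((t : Int) + 1)).flatMap (pvG (cs.length : Int)) =
            (PySem.List.enumerate ys (0 + 1)).flatMap (pvG (((cs.length - t : Nat)) : Int)) := by
          apply pvHelper2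
          · omega
          · omega
          · rw [← hcast]; ring
        rw [htail, hchunk]
        simp

-- ===== VERDICT (by name: the statement is the Claim_ definition above) =====
theorem pretty_bits_msb_py_spec : Claim_equal_pretty_bits_msb_py := by
  intro bits _
  unfold Spec_pretty_bits_msb_py pretty_bits_msb_py pretty_bits_msb_py_alt
  show String.mk (PySem.Chars.join [' '] (pvAChunks bits.toList)) =
    String.mk ((PySem.List.enumerate bits.toList).foldl (pvBStep (bits.toList.length : Int)) [])
  refine congrArg String.mk ?_
  rw [pvB_foldl, List.nil_append]
  exact pvMain bits.toList.length bits.toList (le_refl _)
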